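-- pv_equiv track=rewrite | github.com/gmaterni/teimed | checkover.py | find_lft
-- ===== SOURCE A (Python) =====
-- def find_lft(s, txt, x):
--     i0 = 0
--     ls = []
--     while True:
--         i = txt.find(s, i0)
--         ls.append(i)
--         if i < 0:
--             break
--         if i >= x:
--             break
--         i0 = i + 1
--     le = len(ls)
--     if le <= 1:
--         return -1
--     else:
--         return ls[le - 2]
-- ===== SOURCE B (Python) =====
-- def find_lft(s, txt, x):
--     end = x + len(s) - 1
--     if end < 0:
--         return -1
--     return txt.rfind(s, 0, end)
-- ===== Notes on version B (the rewrite author's own statement) =====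
-- stated objective: idiomatic
-- what changed: Replaces the forward occurrence-collecting find loop with a single backward txt.rfind(s, 0, x+len(s)-1) call (guarding a negative end bound), which returns the last occurrence starting before x directly.
import Mathlib
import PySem

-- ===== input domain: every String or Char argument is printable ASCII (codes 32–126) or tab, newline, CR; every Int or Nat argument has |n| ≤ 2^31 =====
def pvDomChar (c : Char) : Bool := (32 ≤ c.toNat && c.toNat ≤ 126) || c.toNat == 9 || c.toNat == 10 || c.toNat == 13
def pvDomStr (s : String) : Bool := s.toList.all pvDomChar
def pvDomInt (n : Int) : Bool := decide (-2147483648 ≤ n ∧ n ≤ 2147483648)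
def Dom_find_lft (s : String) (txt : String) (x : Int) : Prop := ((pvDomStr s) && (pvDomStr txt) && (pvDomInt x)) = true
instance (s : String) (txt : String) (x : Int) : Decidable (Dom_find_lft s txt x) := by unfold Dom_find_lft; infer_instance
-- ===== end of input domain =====

-- B replaces A's forward occurrence-collecting find loop by a single backward rfind
-- with end bound x + len(s) - 1 (idiomatic one-call re-implementation).


-- ===== PORT A =====
-- termination fact the loop cites: txt.find(s, i0) = -1 once i0 is past the end
theorem pvFindFrom_of_len_lt (s sub : List Char) (i0 : Nat) (h : s.length < i0) :
    PySem.Chars.findFrom s sub (i0 : Int) none = -1 := by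
  simp only [PySem.Chars.findFrom]
  rw [if_neg (by omega : ¬ ((i0 : Int) < 0)), if_pos (by exact_mod_cast h)]

-- the 'while True' loop of A: ls collects each txt.find(s, i0) result
def find_lft_loop (s txt : List Char) (x : Int) (i0 : Nat) (ls : List Int) : List Int :=
  let i := PySem.Chars.findFrom txt s (i0 : Int) none
  if h1 : i < 0 then ls ++ [i]
  else if h2 : x ≤ i then ls ++ [i]
  else find_lft_loop s txt x (i.toNat + 1) (ls ++ [i])
termination_by txt.length + 1 - i0
decreasing_by
  have hieq : i = PySem.Chars.findFrom txt s (i0 : Int) none := rfl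
  rw [hieq] at h1 h2
  have hle : i0 ≤ txt.length := by
    by_contra hgt
    rw [pvFindFrom_of_len_lt txt s i0 (by omega)] at h1
    omega
  have hki := (PySem.Chars.findFrom_natCast_spec txt s i0 hle (by omega)).1
  omega

def find_lft (s : String) (txt : String) (x : Int) : Int :=
  let ls := find_lft_loop s.toList txt.toList x 0 []
  let le := ls.length
  if le ≤ 1 then -1 else ls.getD (le - 2) 0

-- ===== PORT B =====
def find_lft_alt (s : String) (txt : String) (x : Int) : Int :=
  let e := x + PySem.Str.len s - 1
  if e < 0 then -1 else PySem.Str.rfindFrom txt s 0 (some e)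

-- ===== PRECONDITION & SPEC =====
def Spec_find_lft (s : String) (txt : String) (x : Int) (out : Int) : Prop := out = find_lft_alt s txt x
instance (s : String) (txt : String) (x : Int) (out : Int) : Decidable (Spec_find_lft s txt x out) := by unfold Spec_find_lft; infer_instance

-- ===== CLAIM (what is proved, stated in full; the proofs are below) =====
def Claim_equal_find_lft : Prop := ∀ (s : String) (txt : String) (x : Int), Dom_find_lft s txt x → Spec_find_lft s txt x (find_lft s txt x)

-- ===== LEMMAS AND PROOFS =====

-- p is an occurrence of s in txt that starts strictly before x
def pvPocc (s txt : List Char) (x : Int) (p : Nat) : Prop :=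
  p ≤ txt.length ∧ s <+: txt.drop p ∧ (p : Int) < x

-- r is the answer: -1 if no such occurrence, else the largest one
def pvIsAns (s txt : List Char) (x : Int) (r : Int) : Prop :=
  (r = -1 ∧ ∀ p, ¬ pvPocc s txt x p) ∨
  (0 ≤ r ∧ pvPocc s txt x r.toNat ∧ ∀ p, pvPocc s txt x p → p ≤ r.toNat)

theorem pvIsAns_unique {s txt : List Char} {x : Int} {r r' : Int}
    (h : pvIsAns s txt x r) (h' : pvIsAns s txt x r') : r = r' := by
  rcases h with ⟨hr, hno⟩ | ⟨hr0, hocc, hmax⟩ <;>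
    rcases h' with ⟨hr', hno'⟩ | ⟨hr0', hocc', hmax'⟩
  · omega
  · exact absurd hocc' (hno _)
  · exact absurd hocc (hno' _)
  · have h1 := hmax _ hocc'
    have h2 := hmax' _ hocc
    omega

theorem pvPrefix_drop_infix {s l : List Char} {k : Nat} (h : s <+: l.drop k) : s <:+: l :=
  h.isInfix.trans (List.drop_suffix k l).isInfix

-- the loop appends a block g to its accumulator; g's second-to-last entry is the
-- largest occurrence ≥ i0 before x (when one exists), else g is a single terminator
theorem pvLoop_spec (s txt : List Char) (x : Int) : ∀ (i0 : Nat) (acc : List Int),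
    ∃ g : List Int,
      find_lft_loop s txt x i0 acc = acc ++ g ∧
      ( (g.length = 1 ∧ ∀ p, i0 ≤ p → ¬ pvPocc s txt x p)
      ∨ (2 ≤ g.length ∧ ∃ pm : Nat, i0 ≤ pm ∧ pvPocc s txt x pm ∧
          (∀ p, i0 ≤ p → pvPocc s txt x p → p ≤ pm) ∧
          g.getD (g.length - 2) 0 = (pm : Int)) ) := by
  intro i0 acc
  induction i0, acc using find_lft_loop.induct (s := s) (txt := txt) (x := x) with
  | case1 i0 acc i h1 =>
    have hi : i = PySem.Chars.findFrom txt s (i0 : Int) none := rfl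
    rw [find_lft_loop, ← hi, dif_pos h1]
    refine ⟨[i], rfl, Or.inl ⟨rfl, ?_⟩⟩
    intro p hp hocc
    by_cases hn : txt.length < i0
    · exact absurd hocc.1 (by omega)
    · have hneg : i = -1 := by
        by_contra hne
        have := (PySem.Chars.findFrom_natCast_spec txt s i0 (by omega) (by rw [← hi]; exact hne)).1
        rw [← hi] at this
        omega
      have hninf := (PySem.Chars.findFrom_natCast_eq_neg_one_iff txt s i0 (by omega)).1 (by rw [← hi]; exact hneg)
      apply hninf
      apply pvPrefix_drop_infix (k := p - i0)
      rw [List.drop_drop]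
      have heq : i0 + (p - i0) = p := by omega
      rw [heq]
      exact hocc.2.1
  | case2 i0 acc i h1 h2 =>
    have hi : i = PySem.Chars.findFrom txt s (i0 : Int) none := rfl
    rw [find_lft_loop, ← hi, dif_neg h1, dif_pos h2]
    have hle : i0 ≤ txt.length := by
      by_contra hgt
      rw [hi, pvFindFrom_of_len_lt txt s i0 (by omega)] at h1
      omega
    obtain ⟨hki, hpref, hmin⟩ := PySem.Chars.findFrom_natCast_spec txt s i0 hle (by rw [← hi]; omega)
    rw [← hi] at hki hpref hmin
    refine ⟨[i], rfl, Or.inl ⟨rfl, ?_⟩⟩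
    intro p hp hocc
    exact hmin p hp (by have := hocc.2.2; omega) hocc.2.1
  | case3 i0 acc i h1 h2 IH =>
    have hi : i = PySem.Chars.findFrom txt s (i0 : Int) none := rfl
    rw [find_lft_loop, ← hi, dif_neg h1, dif_neg h2]
    have hle : i0 ≤ txt.length := by
      by_contra hgt
      rw [hi, pvFindFrom_of_len_lt txt s i0 (by omega)] at h1
      omega
    obtain ⟨hki, hpref, hmin⟩ := PySem.Chars.findFrom_natCast_spec txt s i0 hle (by rw [← hi]; omega)
    rw [← hi] at hki hpref hmin
    have hiLen : i.toNat ≤ txt.length := by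
      have hff := PySem.Chars.findFrom_natCast txt s i0 hle
      rw [← hi] at hff
      have hfle := PySem.Chars.find_le_length (txt.drop i0) s
      rw [List.length_drop] at hfle
      split at hff <;> omega
    have hocc_i : pvPocc s txt x i.toNat := ⟨hiLen, hpref, by omega⟩
    obtain ⟨g', hg', hcase⟩ := IH
    refine ⟨i :: g', ?_, ?_⟩
    · rw [hg', List.append_assoc, List.singleton_append]
    rcases hcase with ⟨hlen1, hnone⟩ | ⟨hlen2, pm, hpm0, hpm, hpmax, hget⟩
    · refine Or.inr ⟨by simp [hlen1], i.toNat, by omega, hocc_i, ?_, ?_⟩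
      · intro p hp hocc
        by_contra hgt
        exact hnone p (by omega) hocc
      · rcases List.length_eq_one_iff.1 hlen1 with ⟨a, rfl⟩
        have hg : (i :: [a]).getD ((i :: [a]).length - 2) 0 = i := rfl
        rw [hg]
        omega
    · refine Or.inr ⟨by simp only [List.length_cons]; omega, pm, by omega, hpm, ?_, ?_⟩
      · intro p hp hocc
        by_cases hpi : i.toNat + 1 ≤ p
        · exact hpmax p hpi hocc
        · omega
      · have hidx : (i :: g').length - 2 = (g'.length - 2) + 1 := by
          simp
          omega
        rw [hidx, List.getD_cons_succ]
        exact hget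

theorem pvA_isAns (s txt : String) (x : Int) :
    pvIsAns s.toList txt.toList x (find_lft s txt x) := by
  unfold find_lft
  obtain ⟨g, hg, hc⟩ := pvLoop_spec s.toList txt.toList x 0 []
  rw [hg, List.nil_append]
  rcases hc with ⟨hlen, hno⟩ | ⟨hlen, pm, hpm0, hocc, hmax, hget⟩
  · rw [if_pos (by omega)]
    exact Or.inl ⟨rfl, fun p => hno p (Nat.zero_le p)⟩
  · rw [if_neg (by omega), hget]
    exact Or.inr ⟨by omega, by simpa using hocc, fun p hp => by
      have := hmax p (Nat.zero_le p) hp; omega⟩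

-- rfind.go finds the largest occurrence position ≤ j, else -1
theorem pvRfindGo_spec (l sub : List Char) (j : Nat) :
    (PySem.Chars.rfind.go l sub j = -1 ∧ ∀ p ≤ j, ¬ sub <+: l.drop p) ∨
    (∃ p : Nat, PySem.Chars.rfind.go l sub j = (p : Int) ∧ p ≤ j ∧ sub <+: l.drop p ∧
      ∀ q ≤ j, sub <+: l.drop q → q ≤ p) := by
  induction j with
  | zero =>
    by_cases h : sub.isPrefixOf l
    · refine Or.inr ⟨0, ?_, le_refl 0, by simpa [List.isPrefixOf_iff_prefix] using h, ?_⟩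
      · show (if sub.isPrefixOf l then (0 : Int) else -1) = 0
        rw [if_pos h]
      · intro q hq _; omega
    · refine Or.inl ⟨?_, ?_⟩
      · show (if sub.isPrefixOf l then (0 : Int) else -1) = -1
        rw [if_neg h]
      · intro p hp
        interval_cases p
        simpa [List.isPrefixOf_iff_prefix] using h
  | succ j ih =>
    have hstep : PySem.Chars.rfind.go l sub (j + 1) =
        if sub.isPrefixOf (l.drop (j + 1)) then ((j : Int) + 1) else PySem.Chars.rfind.go l sub j := rfl
    by_cases h : sub.isPrefixOf (l.drop (j + 1))
    · refine Or.inr ⟨j + 1, by rw [hstep, if_pos h]; push_cast; ring, le_refl _,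
        by simpa [List.isPrefixOf_iff_prefix] using h, fun q hq _ => hq⟩
    · rw [hstep, if_neg h]
      rcases ih with ⟨hr, hno⟩ | ⟨p, hr, hple, hpref, hmax⟩
      · refine Or.inl ⟨hr, ?_⟩
        intro p hp
        rcases Nat.lt_or_ge p (j + 1) with hlt | hge
        · exact hno p (by omega)
        · have : p = j + 1 := by omega
          subst this
          simpa [List.isPrefixOf_iff_prefix] using h
      · refine Or.inr ⟨p, hr, by omega, hpref, ?_⟩
        intro q hq hqpref
        rcases Nat.lt_or_ge q (j + 1) with hlt | hge
        · exact hmax q (by omega) hqpref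
        · have : q = j + 1 := by omega
          subst this
          exact absurd hqpref (by simpa [List.isPrefixOf_iff_prefix] using h)

theorem pvB_isAns (s txt : String) (x : Int) :
    pvIsAns s.toList txt.toList x (find_lft_alt s txt x) := by
  unfold find_lft_alt
  have hlen : PySem.Str.len s = (s.toList.length : Int) := by
    simp [PySem.Str.len_eq]
  set L : Nat := s.toList.length with hL
  set n : Nat := txt.toList.length with hn
  by_cases he : x + PySem.Str.len s - 1 < 0
  · rw [if_pos he]
    refine Or.inl ⟨rfl, ?_⟩
    rintro p ⟨hpn, hpref, hpx⟩
    have hL' := hpref.length_le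
    rw [List.length_drop] at hL'
    rw [hlen] at he
    omega
  · rw [if_neg he, PySem.Str.rfindFrom_eq]
    rw [hlen] at he ⊢
    set e : Int := x + (L : Int) - 1 with hedef
    have he0 : 0 ≤ e := by omega
    -- unfold rfindFrom at start 0, end e ≥ 0
    have hunf : PySem.Chars.rfindFrom txt.toList s.toList 0 (some e) =
        (if PySem.Chars.rfind (List.take (min e.toNat n) txt.toList) s.toList = -1 then -1
         else PySem.Chars.rfind (List.take (min e.toNat n) txt.toList) s.toList) := by
      simp only [PySem.Chars.rfindFrom]
      have hE : (if (txt.toList.length : Int) < e then (txt.toList.length : Int)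
          else if e < 0 then (if e + (txt.toList.length : Int) < 0 then 0 else e + (txt.toList.length : Int)) else e)
          = ((min e.toNat txt.toList.length : Nat) : Int) := by
        split_ifs <;> push_cast <;> omega
      rw [hE]
      have h00 : (if (0:Int) < 0 then (if (0:Int) + (txt.toList.length : Int) < 0 then 0 else 0 + (txt.toList.length : Int)) else 0) = 0 := if_neg (by omega)
      rw [h00]
      rw [if_neg (by push_cast; omega : ¬ ((min e.toNat txt.toList.length : Nat) : Int) < 0)]
      simp only [Int.toNat_natCast, Int.toNat_zero, List.drop_zero, zero_add]
      rfl
    rw [hunf]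
    set m : Nat := min e.toNat n with hm
    have hmn : m ≤ n := by omega
    have htl : (List.take m txt.toList).length = m := by
      rw [List.length_take]; omega
    -- occurrence in the truncated text ↔ occurrence in txt ending by m
    have hocc_iff : ∀ p : Nat, p ≤ m →
        (s.toList <+: (List.take m txt.toList).drop p ↔
         s.toList <+: txt.toList.drop p ∧ p + L ≤ m) := by
      intro p hpm
      rw [List.drop_take, List.prefix_take_iff]
      constructor
      · rintro ⟨h1, h2⟩; exact ⟨h1, by omega⟩
      · rintro ⟨h1, h2⟩; exact ⟨h1, by omega⟩
    have hPocc_iff : ∀ p : Nat, pvPocc s.toList txt.toList x p ↔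
        (p ≤ m ∧ s.toList <+: (List.take m txt.toList).drop p) := by
      intro p
      constructor
      · rintro ⟨hpn, hpref, hpx⟩
        have hL' := hpref.length_le
        rw [List.length_drop] at hL'
        have hpm : p + L ≤ m := by omega
        exact ⟨by omega, (hocc_iff p (by omega)).2 ⟨hpref, hpm⟩⟩
      · rintro ⟨hpm, hpref⟩
        have := (hocc_iff p hpm).1 hpref
        exact ⟨by omega, this.1, by omega⟩
    have hgo : PySem.Chars.rfind (List.take m txt.toList) s.toList =
        PySem.Chars.rfind.go (List.take m txt.toList) s.toList (List.take m txt.toList).length := rfl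
    rcases pvRfindGo_spec (List.take m txt.toList) s.toList (List.take m txt.toList).length with
      ⟨hr, hno⟩ | ⟨p, hr, hple, hpref, hmax⟩
    · rw [hgo, hr, if_pos rfl]
      refine Or.inl ⟨rfl, ?_⟩
      intro p hp
      rw [hPocc_iff] at hp
      exact hno p (by omega) hp.2
    · rw [hgo, hr, if_neg (by omega)]
      refine Or.inr ⟨by omega, ?_, ?_⟩
      · rw [Int.toNat_natCast]
        exact (hPocc_iff p).2 ⟨by omega, hpref⟩
      · intro q hq
        rw [hPocc_iff] at hq
        have := hmax q (by omega) hq.2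
        omega

-- ===== VERDICT (by name: the statement is the Claim_ definition above) =====
theorem find_lft_spec : Claim_equal_find_lft := by
  intro s txt x _
  unfold Spec_find_lft
  exact pvIsAns_unique (pvA_isAns s txt x) (pvB_isAns s txt x)
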